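-- pv_equiv track=rewrite | github.com/lkh426/pg-test | fetch_xlink_files.py | detect_text_encoding
-- ===== SOURCE A (Python) =====
-- from typing import List, Tuple, Optional
--
-- def detect_text_encoding(content_type: str | None) -> Optional[str]:
--     if not content_type:
--         return None
--     parts = [p.strip() for p in content_type.split(";")]
--     for p in parts:
--         if p.lower().startswith("charset="):
--             return p.split("=", 1)[1].strip() or None
--     return None
-- ===== SOURCE B (Python) =====
-- def detect_text_encoding(content_type):
--     # Single character-level scan: no part list is built; skip a segment's leading
--     # whitespace, compare an 8-char window case-insensitively, else jump to the
--     # next segment separator.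
--     if not content_type:
--         return None
--     s = content_type
--     n = len(s)
--     pos = 0
--     while True:
--         i = pos
--         while i < n and s[i].isspace():
--             i += 1
--         if s[i:i + 8].lower() == "charset=":
--             j = i + 8
--             while j < n and s[j] != ";":
--                 j += 1
--             return s[i + 8:j].strip() or None
--         j = pos
--         while j < n and s[j] != ";":
--             j += 1
--         if j == n:
--             return None
--         pos = j + 1
-- ===== Notes on version B (the rewrite author's own statement) =====
-- stated objective: alternative
-- what changed: Replaces the split-on-semicolon part-list construction (strip/lower/startswith/split per part) with a single index-based character scan that skips a segment's leading whitespace, compares an 8-character window case-insensitively and jumps to the next segment separator.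
import Mathlib
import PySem

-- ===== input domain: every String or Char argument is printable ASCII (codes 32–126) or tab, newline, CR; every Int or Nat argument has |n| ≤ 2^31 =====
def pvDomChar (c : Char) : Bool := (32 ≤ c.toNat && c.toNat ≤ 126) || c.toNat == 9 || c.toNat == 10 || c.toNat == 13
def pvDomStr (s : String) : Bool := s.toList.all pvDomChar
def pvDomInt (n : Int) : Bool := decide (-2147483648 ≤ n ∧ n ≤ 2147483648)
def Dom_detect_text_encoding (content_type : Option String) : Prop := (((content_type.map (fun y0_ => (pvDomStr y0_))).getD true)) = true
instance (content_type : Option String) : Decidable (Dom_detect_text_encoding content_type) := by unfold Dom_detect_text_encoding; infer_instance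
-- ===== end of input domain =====

-- B replaces A's split(';')/strip part-list construction by a single index-based
-- character scan over the string; equal return value on every input (alternative
-- decomposition, no speed claim).


-- ===== PORT A =====
def aCharset : List Char := ['c','h','a','r','s','e','t','=']

def aLoop : List (List Char) → Option String
  | [] => none
  | p :: rest =>
    if PySem.Chars.startswith (PySem.Chars.lower p) aCharset then
      match PySem.Chars.splitOnMax p ['='] 1 with
      | _ :: v :: _ =>
        let v' := PySem.Chars.strip v
        if v' = [] then none else some (String.ofList v')
      | _ => none  -- unreachable: p starts (lowercased) with "charset=", so it contains '='
    else aLoop rest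

def detect_text_encoding (content_type : Option String) : Option String :=
  match content_type with
  | none => none
  | some s =>
    if s.toList = [] then none
    else aLoop ((PySem.Chars.splitOn s.toList [';']).map PySem.Chars.strip)

-- ===== PORT B =====
def bCharset : List Char := ['c','h','a','r','s','e','t','=']

-- while i < n and s[i].isspace(): i += 1
def bSkipWs (cs : List Char) (i : Nat) : Nat :=
  if h : i < cs.length then
    if PySem.Chars.isspace cs[i] then bSkipWs cs (i+1) else i
  else i
termination_by cs.length - i

-- while j < n and s[j] != ";": j += 1
def bFindSemi (cs : List Char) (j : Nat) : Nat :=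
  if h : j < cs.length then
    if cs[j] = ';' then j else bFindSemi cs (j+1)
  else j
termination_by cs.length - j

theorem bFindSemi_ge (cs : List Char) (j : Nat) : j ≤ bFindSemi cs j := by
  unfold bFindSemi
  split
  · split
    · exact le_refl _
    · exact le_trans (Nat.le_succ j) (bFindSemi_ge cs (j+1))
  · exact le_refl _
termination_by cs.length - j

theorem bFindSemi_le (cs : List Char) (j : Nat) (h : j ≤ cs.length) :
    bFindSemi cs j ≤ cs.length := by
  unfold bFindSemi
  split
  · split
    · exact le_of_lt ‹_›
    · exact bFindSemi_le cs (j+1) (by omega)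
  · exact h
termination_by cs.length - j

-- the outer 'while True' loop of B
def bScan (cs : List Char) (pos : Nat) : Option String :=
  if hp : cs.length < pos then none  -- totalization guard, never reached from pos = 0
  else
    let i := bSkipWs cs pos
    if PySem.Chars.lower (PySem.List.slice cs (some (i : Int)) (some ((i : Int) + 8))) = bCharset then
      let j := bFindSemi cs (i + 8)
      let v := PySem.Chars.strip (PySem.List.slice cs (some ((i : Int) + 8)) (some (j : Int)))
      if v = [] then none else some (String.ofList v)
    else
      let j := bFindSemi cs pos
      if hj : j = cs.length then none
      else bScan cs (j + 1)
termination_by cs.length + 1 - pos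
decreasing_by
  have h1 : pos ≤ bFindSemi cs pos := bFindSemi_ge cs pos
  have h2 : bFindSemi cs pos ≤ cs.length := bFindSemi_le cs pos (by omega)
  omega

def detect_text_encoding_alt (content_type : Option String) : Option String :=
  match content_type with
  | none => none
  | some s =>
    if s.toList = [] then none
    else bScan s.toList 0

-- ===== PRECONDITION & SPEC =====
def Spec_detect_text_encoding (content_type : Option String) (out : Option String) : Prop := out = detect_text_encoding_alt content_type
instance (content_type : Option String) (out : Option String) : Decidable (Spec_detect_text_encoding content_type out) := by unfold Spec_detect_text_encoding; infer_instance

-- ===== CLAIM (what is proved, stated in full; the proofs are below) =====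
def Claim_equal_detect_text_encoding : Prop := ∀ (content_type : Option String), Dom_detect_text_encoding content_type → Spec_detect_text_encoding content_type (detect_text_encoding content_type)

-- ===== LEMMAS AND PROOFS =====

def consHead (p : List Char) : List (List Char) → List (List Char)
  | [] => [p]
  | q :: r => (p ++ q) :: r

def segs : List Char → List (List Char)
  | [] => [[]]
  | x :: xs => if x = ';' then [] :: segs xs else consHead [x] (segs xs)

theorem consHead_append (a b : List Char) (q : List (List Char)) :
    consHead (a ++ b) q = consHead a (consHead b q) := by
  cases q <;> simp [consHead]

theorem segs_ne_nil (l : List Char) : segs l ≠ [] := by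
  cases l with
  | nil => simp [segs]
  | cons x xs =>
    simp only [segs]
    split
    · simp
    · cases segs xs <;> simp [consHead]

theorem segs_no_semi (l : List Char) (h : ∀ x ∈ l, x ≠ ';') : segs l = [l] := by
  induction l with
  | nil => rfl
  | cons x xs ih =>
    have hx : x ≠ ';' := h x (by simp)
    simp only [segs, if_neg hx, ih (fun y hy => h y (by simp [hy]))]
    rfl

theorem segs_append_semi (seg r : List Char) (h : ∀ x ∈ seg, x ≠ ';') :
    segs (seg ++ ';' :: r) = seg :: segs r := by
  induction seg with
  | nil => simp [segs]
  | cons x xs ih =>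
    have hx : x ≠ ';' := h x (by simp)
    simp only [List.cons_append, segs, if_neg hx, ih (fun y hy => h y (by simp [hy]))]
    cases hseg : segs (xs ++ ';' :: r) with
    | nil => exact absurd hseg (segs_ne_nil _)
    | cons a b =>
      rw [ih (fun y hy => h y (by simp [hy]))] at hseg
      cases hseg
      simp [consHead]

theorem splitOn_go_spec (fuel : Nat) (l cur acc : _) (h : l.length < fuel) :
    PySem.Chars.splitOn.go [';'] fuel l cur acc = acc.reverse ++ consHead cur.reverse (segs l) := by
  induction fuel generalizing l cur acc with
  | zero => omega
  | succ f ih =>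
    cases l with
    | nil =>
      simp [PySem.Chars.splitOn.go, segs, consHead]
    | cons x xs =>
      rw [PySem.Chars.splitOn.go]
      by_cases hx : x = ';'
      · have hpre : [';'].isPrefixOf (x :: xs) = true := by simp [hx, List.isPrefixOf]
        rw [if_pos hpre]
        simp only [List.length_singleton, List.drop_one, List.tail_cons]
        rw [ih xs [] (cur.reverse :: acc) (by simpa using Nat.lt_of_succ_lt_succ h)]
        simp only [segs, if_pos hx]
        cases hs : segs xs with
        | nil => exact absurd hs (segs_ne_nil xs)
        | cons a b => simp [consHead]
      · have hpre : [';'].isPrefixOf (x :: xs) = false := by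
          simp [List.isPrefixOf]; exact fun h' => hx h'.symm
        rw [if_neg (by simp [hpre])]
        rw [ih xs (x :: cur) acc (by simpa using Nat.lt_of_succ_lt_succ h)]
        simp only [segs, if_neg hx, List.reverse_cons]
        rw [consHead_append]

theorem splitOn_semi (l : List Char) : PySem.Chars.splitOn l [';'] = segs l := by
  unfold PySem.Chars.splitOn
  rw [splitOn_go_spec (l.length+1) l [] [] (by omega)]
  cases hs : segs l with
  | nil => exact absurd hs (segs_ne_nil l)
  | cons a b => simp [consHead]

theorem splitOnMax_go_zero (fuel : Nat) (l cur acc : _) :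
    PySem.Chars.splitOnMax.go ['='] fuel 0 l cur acc = acc.reverse ++ [cur.reverse ++ l] := by
  cases fuel with
  | zero => simp [PySem.Chars.splitOnMax.go]
  | succ f =>
    cases l with
    | nil => simp [PySem.Chars.splitOnMax.go]
    | cons x xs => rw [PySem.Chars.splitOnMax.go]; simp

theorem splitOnMax_go_one (fuel : Nat) (l cur acc : _) (h : l.length < fuel) (hm : '=' ∈ l) :
    PySem.Chars.splitOnMax.go ['='] fuel 1 l cur acc =
      acc.reverse ++ [cur.reverse ++ l.takeWhile (· != '='), (l.dropWhile (· != '=')).tail] := by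
  induction fuel generalizing l cur acc with
  | zero => omega
  | succ f ih =>
    cases l with
    | nil => simp at hm
    | cons x xs =>
      rw [PySem.Chars.splitOnMax.go]
      simp only [if_neg (one_ne_zero)]
      by_cases hx : x = '='
      · have hpre : ['='].isPrefixOf (x :: xs) = true := by simp [hx, List.isPrefixOf]
        rw [if_pos hpre]
        simp only [List.length_singleton, List.drop_one, List.tail_cons]
        rw [show (1 : Nat) - 1 = 0 from rfl, splitOnMax_go_zero]
        rw [List.takeWhile_cons_of_neg (by simp [hx]), List.dropWhile_cons_of_neg (by simp [hx])]
        simp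
      · have hpre : ['='].isPrefixOf (x :: xs) = false := by
          simp [List.isPrefixOf]; exact fun h' => hx h'.symm
        rw [if_neg (by simp [hpre])]
        have hm' : '=' ∈ xs := by
          cases hm with
          | head => exact absurd rfl hx
          | tail _ h => exact h
        rw [ih xs (x :: cur) acc (by simpa using Nat.lt_of_succ_lt_succ h) hm']
        rw [List.takeWhile_cons_of_pos (by simp [hx]), List.dropWhile_cons_of_pos (by simp [hx])]
        simp

theorem splitOnMax_eq_of_mem (p : List Char) (hm : '=' ∈ p) :
    PySem.Chars.splitOnMax p ['='] 1 = [p.takeWhile (· != '='), (p.dropWhile (· != '=')).tail] := by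
  unfold PySem.Chars.splitOnMax
  rw [if_neg (by omega), show Int.toNat 1 = 1 from rfl]
  rw [splitOnMax_go_one (p.length+1) p [] [] (by omega) hm]
  simp

theorem rstrip_decomp (l : List Char) :
    l = PySem.Chars.rstrip l ++ (l.reverse.takeWhile PySem.Chars.isspace).reverse := by
  unfold PySem.Chars.rstrip
  conv_lhs => rw [← List.reverse_reverse l,
    ← List.takeWhile_append_dropWhile (p := PySem.Chars.isspace) (l := l.reverse)]
  rw [List.reverse_append]

theorem rstrip_suffix_ws (l : List Char) :
    ∀ x ∈ (l.reverse.takeWhile PySem.Chars.isspace).reverse, PySem.Chars.isspace x = true := by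
  intro x hx
  rw [List.mem_reverse] at hx
  exact List.mem_takeWhile_imp hx

theorem dropWhile_ws_nil (w : List Char) (hw : ∀ x ∈ w, PySem.Chars.isspace x = true) :
    w.dropWhile PySem.Chars.isspace = [] := by
  rw [List.dropWhile_eq_nil_iff]
  intro x hx
  exact hw x hx

theorem rstrip_append_ws (a w : List Char) (hw : ∀ x ∈ w, PySem.Chars.isspace x = true) :
    PySem.Chars.rstrip (a ++ w) = PySem.Chars.rstrip a := by
  unfold PySem.Chars.rstrip
  rw [List.reverse_append, List.dropWhile_append,
    dropWhile_ws_nil w.reverse (fun x hx => hw x (List.mem_reverse.mp hx))]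
  simp

theorem rstrip_all_ws (w : List Char) (hw : ∀ x ∈ w, PySem.Chars.isspace x = true) :
    PySem.Chars.rstrip w = [] := by
  unfold PySem.Chars.rstrip
  rw [dropWhile_ws_nil w.reverse (fun x hx => hw x (List.mem_reverse.mp hx))]
  rfl

theorem strip_append_ws (a w : List Char) (hw : ∀ x ∈ w, PySem.Chars.isspace x = true) :
    PySem.Chars.strip (a ++ w) = PySem.Chars.strip a := by
  unfold PySem.Chars.strip PySem.Chars.lstrip
  rw [List.dropWhile_append]
  split
  · rename_i he
    rw [List.isEmpty_iff] at he
    rw [rstrip_all_ws _ (fun x hx => hw x ((List.dropWhile_sublist _).subset hx)), he]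
    rfl
  · exact rstrip_append_ws _ w hw

theorem lowerChar_char_range (c : Char) (hup : PySem.Chars.isupper c = true) :
    65 ≤ c.toNat ∧ c.toNat ≤ 90 := by
  unfold PySem.Chars.isupper at hup
  simp only [Bool.and_eq_true, decide_eq_true_eq] at hup
  exact ⟨hup.1, hup.2⟩

theorem lowerChar_fixed_nonalpha (c d : Char) (hd : d.toNat < 65) :
    PySem.Chars.lowerChar c = d ↔ c = d := by
  unfold PySem.Chars.lowerChar
  split
  · rename_i hup
    have hr := lowerChar_char_range c hup
    apply iff_of_false
    · intro he
      have := congrArg Char.toNat he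
      rw [Char.toNat_ofNat] at this
      rw [if_pos (Or.inl (by omega))] at this
      omega
    · intro he
      subst he
      omega
  · exact Iff.rfl

theorem lowerChar_eq_eq (c : Char) : PySem.Chars.lowerChar c = '=' ↔ c = '=' :=
  lowerChar_fixed_nonalpha c '=' (by decide)

def P8 (q : List Char) : Prop := PySem.Chars.lower (q.take 8) = aCharset

theorem P8_len (q : List Char) (h : P8 q) : 8 ≤ q.length := by
  unfold P8 PySem.Chars.lower at h
  have := congrArg List.length h
  simp [aCharset] at this
  omega

theorem P8_append_left (a b : List Char) (ha : 8 ≤ a.length) : P8 (a ++ b) ↔ P8 a := by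
  unfold P8
  rw [List.take_append_of_le_length ha]

theorem P8_append_semi (L tail : List Char)
    (htail : tail = [] ∨ ∃ r, tail = ';' :: r) :
    P8 (L ++ tail) ↔ P8 L := by
  constructor
  · intro h
    have hlen := P8_len _ h
    rw [List.length_append] at hlen
    by_cases hL : 8 ≤ L.length
    · exact (P8_append_left L tail hL).mp h
    · exfalso
      replace hL : L.length < 8 := by omega
      obtain rfl | ⟨r, rfl⟩ := htail
      · simp at hlen; omega
      · unfold P8 PySem.Chars.lower at h
        have hidx : L.length < 8 := hL
        have hlt : L.length < ((L ++ ';' :: r).take 8).length := by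
          simp [List.length_take]
          omega
        have hmap : (List.map PySem.Chars.lowerChar ((L ++ ';' :: r).take 8))[L.length]'(by simpa using hlt)
            = aCharset[L.length]'(by simp [aCharset]; omega) := List.getElem_of_eq h _
        rw [List.getElem_map] at hmap
        rw [List.getElem_take] at hmap
        rw [List.getElem_append_right (le_refl L.length)] at hmap
        simp at hmap
        have hsemi := List.getElem_mem (l := aCharset) (n := L.length) (h := by simpa [aCharset] using hL)
        rw [← hmap, show PySem.Chars.lowerChar ';' = ';' from by decide] at hsemi
        exact (by decide : ¬ (';' : Char) ∈ aCharset) hsemi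
  · intro h
    exact (P8_append_left L tail (P8_len _ h)).mpr h

theorem P8_take8_len (q : List Char) (h : P8 q) : (q.take 8).length = 8 := by
  have := P8_len q h
  simp [List.length_take]
  omega

theorem P8_seven_eq (q : List Char) (h : P8 q) :
    ∃ u, q = q.take 7 ++ '=' :: u ∧ ∀ x ∈ q.take 7, x ≠ '=' := by
  have hlen := P8_take8_len q h
  unfold P8 PySem.Chars.lower at h
  obtain ⟨c0, c1, c2, c3, c4, c5, c6, c7, hw⟩ :
      ∃ c0 c1 c2 c3 c4 c5 c6 c7, q.take 8 = [c0, c1, c2, c3, c4, c5, c6, c7] := by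
    match hq : q.take 8, hlen with
    | [c0, c1, c2, c3, c4, c5, c6, c7], _ => exact ⟨c0, c1, c2, c3, c4, c5, c6, c7, rfl⟩
  rw [hw] at h
  simp [aCharset] at h
  obtain ⟨h0, h1, h2, h3, h4, h5, h6, h7⟩ := h
  have hc7 : c7 = '=' := (lowerChar_eq_eq c7).mp h7
  have h7' : q.take 7 = [c0, c1, c2, c3, c4, c5, c6] := by
    have : q.take 7 = (q.take 8).take 7 := by
      rw [List.take_take]
      norm_num
    rw [this, hw]
    rfl
  refine ⟨q.drop 8, ?_, ?_⟩
  · conv_lhs => rw [← List.take_append_drop 8 q]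
    rw [hw, h7', hc7]
    simp
  · intro x hx
    rw [h7'] at hx
    simp at hx
    rcases hx with rfl | rfl | rfl | rfl | rfl | rfl | rfl
    · exact fun he => absurd (he ▸ h0) (by decide)
    · exact fun he => absurd (he ▸ h1) (by decide)
    · exact fun he => absurd (he ▸ h2) (by decide)
    · exact fun he => absurd (he ▸ h3) (by decide)
    · exact fun he => absurd (he ▸ h4) (by decide)
    · exact fun he => absurd (he ▸ h5) (by decide)
    · exact fun he => absurd (he ▸ h6) (by decide)

theorem P8_rstrip (L : List Char) :
    P8 L ↔ (P8 (PySem.Chars.rstrip L) ∧ 8 ≤ (PySem.Chars.rstrip L).length) := by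
  constructor
  · intro h
    have hR : 8 ≤ (PySem.Chars.rstrip L).length := by
      by_contra hR
      replace hR : (PySem.Chars.rstrip L).length < 8 := by omega
      have hlen := P8_len L h
      -- L[7] lies in the whitespace suffix but must lower to '='
      obtain ⟨u, hu, _⟩ := P8_seven_eq L h
      have ht7 : (L.take 7).length = 7 := by simp [List.length_take]; omega
      have h7eq : L[7]'(by omega) = '=' := by
        rw [List.getElem_of_eq hu, List.getElem_append_right (by omega)]
        simp [ht7]
      have hdec := rstrip_decomp L
      set R := PySem.Chars.rstrip L with hRdef
      set W := (L.reverse.takeWhile PySem.Chars.isspace).reverse with hWdef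
      have h7w : L[7]'(by omega) = W[7 - R.length]'(by
          have := congrArg List.length hdec
          simp at this
          omega) := by
        rw [List.getElem_of_eq hdec, List.getElem_append_right (by omega)]
      have hwmem : PySem.Chars.isspace (W[7 - R.length]'(by
          have := congrArg List.length hdec
          simp at this
          omega)) = true :=
        rstrip_suffix_ws L _ (List.getElem_mem _)
      rw [← h7w, h7eq] at hwmem
      exact absurd hwmem (by decide)
    constructor
    · have hdec := rstrip_decomp L
      rw [hdec] at h
      exact (P8_append_left _ _ hR).mp h
    · exact hR
  · intro ⟨h, hR⟩
    rw [rstrip_decomp L]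
    exact (P8_append_left _ _ hR).mpr h

-- head of a dropWhile result falsifies the predicate
theorem dropWhile_head_false (p : Char → Bool) (l : List Char) (y : Char) (r : List Char)
    (h : l.dropWhile p = y :: r) : p y = false := by
  induction l with
  | nil => simp at h
  | cons x xs ih =>
    rw [List.dropWhile_cons] at h
    split at h
    · exact ih h
    · cases h
      rename_i hx
      simpa using hx

theorem bSkipWs_eq (cs : List Char) (pos : Nat) :
    bSkipWs cs pos = pos + ((cs.drop pos).takeWhile PySem.Chars.isspace).length := by
  unfold bSkipWs
  split
  · rename_i h
    rw [List.drop_eq_getElem_cons h]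
    by_cases hw : PySem.Chars.isspace cs[pos]
    · rw [if_pos hw, bSkipWs_eq cs (pos+1), List.takeWhile_cons_of_pos hw, List.length_cons]
      omega
    · rw [if_neg hw, List.takeWhile_cons_of_neg (by simpa using hw)]
      simp
  · rename_i h
    have : cs.drop pos = [] := List.drop_eq_nil_of_le (by omega)
    simp [this]
termination_by cs.length - pos

theorem bFindSemi_eq (cs : List Char) (pos : Nat) :
    bFindSemi cs pos = pos + ((cs.drop pos).takeWhile (· != ';')).length := by
  unfold bFindSemi
  split
  · rename_i h
    rw [List.drop_eq_getElem_cons h]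
    by_cases he : cs[pos] = ';'
    · rw [if_pos he, List.takeWhile_cons_of_neg (by simp [he])]
      simp
    · rw [if_neg he, bFindSemi_eq cs (pos+1), List.takeWhile_cons_of_pos (by simp [he]), List.length_cons]
      omega
  · rename_i h
    have : cs.drop pos = [] := List.drop_eq_nil_of_le (by omega)
    simp [this]
termination_by cs.length - pos

-- A's head test, read through strip/startswith, is the 8-char window test of B
theorem cond_iff (seg tail : List Char)
    (htail : tail = [] ∨ ∃ r, tail = ';' :: r) :
    P8 (PySem.Chars.lstrip seg ++ tail) ↔
      PySem.Chars.startswith (PySem.Chars.lower (PySem.Chars.strip seg)) aCharset = true := by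
  rw [P8_append_semi _ tail htail, P8_rstrip, PySem.Chars.startswith_iff]
  unfold PySem.Chars.strip
  constructor
  · intro ⟨h8, _⟩
    rw [List.prefix_iff_eq_take]
    unfold P8 PySem.Chars.lower at h8
    rw [show aCharset.length = 8 from rfl, ← h8]
    unfold PySem.Chars.lower
    rw [List.map_take]
  · intro hpre
    have h8 : P8 (PySem.Chars.rstrip (PySem.Chars.lstrip seg)) := by
      rw [List.prefix_iff_eq_take, show aCharset.length = 8 from rfl] at hpre
      unfold PySem.Chars.lower at hpre
      unfold P8 PySem.Chars.lower
      rw [List.map_take, ← hpre]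
    exact ⟨h8, P8_len _ h8⟩

-- A's value: the piece after the first '=' of p is p.drop 8
theorem a_value (R : List Char) (hP : P8 R) :
    (R.dropWhile (· != '=')).tail = R.drop 8 := by
  obtain ⟨u, hu, ha⟩ := P8_seven_eq R hP
  have hlen := P8_len R hP
  have ht7 : (R.take 7).length = 7 := by simp [List.length_take]; omega
  have hd : R.dropWhile (· != '=') = '=' :: u := by
    conv_lhs => rw [hu]
    rw [List.dropWhile_append]
    rw [List.dropWhile_eq_nil_iff.mpr (fun x hx => by simpa using ha x hx)]
    simp
  rw [hd]
  have : R.drop 8 = u := by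
    conv_lhs => rw [hu, show R.take 7 ++ '=' :: u = (R.take 7 ++ ['=']) ++ u by simp]
    exact List.drop_left' (by simp [ht7])
  rw [this]
  rfl

-- B's value: the scan from i+8 to the next ';' picks up exactly L.drop 8
theorem b_value (L tail : List Char) (hnoL : ∀ x ∈ L, x ≠ ';')
    (htail : tail = [] ∨ ∃ r, tail = ';' :: r) (hP : P8 L) :
    ((L ++ tail).drop 8).takeWhile (· != ';') = L.drop 8 := by
  have h8 := P8_len L hP
  rw [List.drop_append_of_le_length h8]
  rw [List.takeWhile_append_of_pos (fun x hx => by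
    simpa using hnoL x ((List.drop_sublist 8 L).subset hx))]
  obtain rfl | ⟨r, rfl⟩ := htail
  · simp
  · rw [List.takeWhile_cons_of_neg (by simp)]
    simp

theorem strip_drop8 (L : List Char) (hP : P8 L) :
    PySem.Chars.strip ((PySem.Chars.rstrip L).drop 8) = PySem.Chars.strip (L.drop 8) := by
  have hR : 8 ≤ (PySem.Chars.rstrip L).length := ((P8_rstrip L).mp hP).2
  conv_rhs => rw [rstrip_decomp L]
  rw [List.drop_append_of_le_length hR, strip_append_ws _ _ (rstrip_suffix_ws L)]

theorem bScan_eq_aLoop (cs : List Char) (pos : Nat) (h : pos ≤ cs.length) :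
    bScan cs pos = aLoop ((segs (cs.drop pos)).map PySem.Chars.strip) := by
  rw [bScan]
  simp only [dif_neg (show ¬ cs.length < pos by omega)]
  obtain ⟨l, hl⟩ : ∃ l', cs.drop pos = l' := ⟨_, rfl⟩
  rw [hl]
  obtain ⟨seg, hsegdef⟩ : ∃ s, l.takeWhile (· != ';') = s := ⟨_, rfl⟩
  obtain ⟨tail, htaildef⟩ : ∃ t, l.dropWhile (· != ';') = t := ⟨_, rfl⟩
  have hlt : seg ++ tail = l := by
    rw [← hsegdef, ← htaildef]; exact List.takeWhile_append_dropWhile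
  have hno : ∀ x ∈ seg, x ≠ ';' := fun x hx => by
    rw [← hsegdef] at hx
    simpa using List.mem_takeWhile_imp hx
  have hnoL : ∀ x ∈ PySem.Chars.lstrip seg, x ≠ ';' := fun x hx =>
    hno x ((List.dropWhile_sublist _).subset hx)
  have htail : tail = [] ∨ ∃ r, tail = ';' :: r := by
    cases htl : tail with
    | nil => exact Or.inl rfl
    | cons y r =>
      have hy : (y != ';') = false := dropWhile_head_false _ l y r (htl ▸ htaildef)
      exact Or.inr ⟨r, by rw [show y = ';' by simpa using hy]⟩
  have hlenl : l.length + pos = cs.length := by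
    rw [← hl, List.length_drop]; omega
  have hskip : bSkipWs cs pos = pos + (l.takeWhile PySem.Chars.isspace).length := by
    rw [bSkipWs_eq, hl]
  have hdropi : cs.drop (bSkipWs cs pos) = PySem.Chars.lstrip seg ++ tail := by
    rw [hskip]
    have h1 : cs.drop (pos + (l.takeWhile PySem.Chars.isspace).length)
        = l.drop ((l.takeWhile PySem.Chars.isspace).length) := by
      rw [← List.drop_drop, hl]
    have h2 : l.drop ((l.takeWhile PySem.Chars.isspace).length)
        = l.dropWhile PySem.Chars.isspace := by
      have h2' := List.drop_left (l₁ := l.takeWhile PySem.Chars.isspace)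
        (l₂ := l.dropWhile PySem.Chars.isspace)
      rwa [List.takeWhile_append_dropWhile] at h2'
    have h3 : l.dropWhile PySem.Chars.isspace = PySem.Chars.lstrip seg ++ tail := by
      conv_lhs => rw [← hlt]
      rw [List.dropWhile_append]
      split
      · rename_i he
        rw [List.isEmpty_iff] at he
        unfold PySem.Chars.lstrip
        rw [he, List.nil_append]
        obtain rfl | ⟨r, rfl⟩ := htail
        · simp
        · exact List.dropWhile_cons_of_neg (by decide)
      · rfl
    rw [h1, h2, h3]
  have hslice : PySem.List.slice cs (some ((bSkipWs cs pos : Nat) : Int))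
      (some (((bSkipWs cs pos : Nat) : Int) + 8)) = (PySem.Chars.lstrip seg ++ tail).take 8 := by
    rw [show ((bSkipWs cs pos : Nat) : Int) + 8 = ((bSkipWs cs pos + 8 : Nat) : Int) by push_cast; ring]
    rw [PySem.List.slice_natCast]
    rw [show bSkipWs cs pos + 8 - bSkipWs cs pos = 8 by omega, hdropi]
  have hsegs : ∃ rest', (segs l).map PySem.Chars.strip = PySem.Chars.strip seg :: rest'
      ∧ ((tail = [] ∧ rest' = []) ∨ (∃ r, tail = ';' :: r ∧ rest' = (segs r).map PySem.Chars.strip)) := by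
    obtain htl | ⟨r, htl⟩ := htail
    · refine ⟨[], ?_, Or.inl ⟨htl, rfl⟩⟩
      have hseg_l : l = seg := by rw [← hlt, htl, List.append_nil]
      rw [hseg_l, segs_no_semi seg hno]
      simp
    · refine ⟨(segs r).map PySem.Chars.strip, ?_, Or.inr ⟨r, htl, rfl⟩⟩
      have hseg_l : l = seg ++ ';' :: r := by rw [← hlt, htl]
      rw [hseg_l, segs_append_semi seg r hno]
      simp
  obtain ⟨rest', hrest, hdisj⟩ := hsegs
  rw [hrest]
  by_cases hc : P8 (PySem.Chars.lstrip seg ++ tail)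
  · -- charset= found in this segment: both sides return the stripped value
    have hcond : PySem.Chars.lower ((PySem.Chars.lstrip seg ++ tail).take 8) = bCharset := hc
    rw [hslice, if_pos hcond]
    have hA : PySem.Chars.startswith (PySem.Chars.lower (PySem.Chars.strip seg)) aCharset = true :=
      (cond_iff seg tail htail).mp hc
    rw [aLoop, if_pos hA]
    have hPL : P8 (PySem.Chars.lstrip seg) := (P8_append_semi _ tail htail).mp hc
    have hPR : P8 (PySem.Chars.rstrip (PySem.Chars.lstrip seg)) := ((P8_rstrip _).mp hPL).1
    have hmem : '=' ∈ PySem.Chars.rstrip (PySem.Chars.lstrip seg) := by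
      obtain ⟨u, hu, _⟩ := P8_seven_eq _ hPR
      rw [hu]; simp
    have hsplit : PySem.Chars.splitOnMax (PySem.Chars.strip seg) ['='] 1 =
        [(PySem.Chars.rstrip (PySem.Chars.lstrip seg)).takeWhile (· != '='),
         ((PySem.Chars.rstrip (PySem.Chars.lstrip seg)).dropWhile (· != '=')).tail] := by
      rw [show PySem.Chars.strip seg = PySem.Chars.rstrip (PySem.Chars.lstrip seg) from rfl]
      exact splitOnMax_eq_of_mem _ hmem
    rw [hsplit]
    have hX : cs.drop (bSkipWs cs pos + 8) = (PySem.Chars.lstrip seg ++ tail).drop 8 := by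
      rw [← hdropi, List.drop_drop]
    have hsliceB : PySem.List.slice cs (some (((bSkipWs cs pos : Nat) : Int) + 8))
        (some ((bFindSemi cs (bSkipWs cs pos + 8) : Nat) : Int)) =
        ((PySem.Chars.lstrip seg ++ tail).drop 8).takeWhile (· != ';') := by
      rw [show ((bSkipWs cs pos : Nat) : Int) + 8 = ((bSkipWs cs pos + 8 : Nat) : Int) by push_cast; ring]
      rw [PySem.List.slice_natCast, bFindSemi_eq cs (bSkipWs cs pos + 8), hX]
      rw [Nat.add_sub_cancel_left]
      exact (List.prefix_iff_eq_take.mp (List.takeWhile_prefix _)).symm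
    rw [hsliceB, b_value _ tail hnoL htail hPL, a_value _ hPR, ← strip_drop8 _ hPL]
  · -- no match in this segment
    have hcond : ¬ PySem.Chars.lower ((PySem.Chars.lstrip seg ++ tail).take 8) = bCharset := hc
    rw [hslice, if_neg hcond]
    have hA : ¬ PySem.Chars.startswith (PySem.Chars.lower (PySem.Chars.strip seg)) aCharset = true :=
      fun hA => hc ((cond_iff seg tail htail).mpr hA)
    rw [aLoop, if_neg hA]
    have hfind : bFindSemi cs pos = pos + seg.length := by
      rw [bFindSemi_eq, hl, hsegdef]
    obtain ⟨htl, rfl⟩ | ⟨r, htl, rfl⟩ := hdisj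
    · subst htl
      have hseg_l : seg = l := by rw [← hlt, List.append_nil]
      have hje : bFindSemi cs pos = cs.length := by rw [hfind, hseg_l]; omega
      rw [dif_pos hje]
      rfl
    · have hlen2 : l.length = seg.length + (r.length + 1) := by
        rw [← hlt, htl]; simp
      have hne : ¬ bFindSemi cs pos = cs.length := by rw [hfind]; omega
      rw [dif_neg hne]
      have hdrop : cs.drop (bFindSemi cs pos + 1) = r := by
        rw [hfind]
        have hd1 : cs.drop (pos + (seg.length + 1)) = l.drop (seg.length + 1) := by
          rw [← List.drop_drop, hl]
        rw [show pos + seg.length + 1 = pos + (seg.length + 1) by omega, hd1, ← hlt, htl]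
        rw [show seg ++ ';' :: r = (seg ++ [';']) ++ r by simp]
        exact List.drop_left' (by simp)
      have := bScan_eq_aLoop cs (bFindSemi cs pos + 1) (by rw [hfind]; omega)
      rw [hdrop] at this
      exact this
termination_by cs.length - pos
decreasing_by
  rw [hfind]
  omega

-- ===== VERDICT (by name: the statement is the Claim_ definition above) =====
theorem detect_text_encoding_spec : Claim_equal_detect_text_encoding := by
  intro ct _
  unfold Spec_detect_text_encoding detect_text_encoding detect_text_encoding_alt
  cases ct with
  | none => rfl
  | some s =>
    by_cases h : s.toList = []
    · simp [h]
    · simp only [h, if_false]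
      have hb := bScan_eq_aLoop s.toList 0 (Nat.zero_le _)
      rw [List.drop_zero] at hb
      rw [splitOn_semi, hb]
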